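-- pv_equiv track=rewrite | github.com/jamesML571/NVIDIA-Hackathon | backend/main_old.py | enhance_issues_with_fixes
-- ===== SOURCE A (Python) =====
-- from typing import List, Dict, Optional
--
-- def enhance_issues_with_fixes(issues: List[Dict], nemotron_content: str) -> List[Dict]:
--     """Add code fixes from Nemotron to existing issues"""
--     enhanced_issues = []
--
--     for issue in issues:
--         enhanced_issue = issue.copy()
--
--         # Try to find relevant code fix in Nemotron's response
--         issue_desc = issue.get('description', '').lower()
--         if 'contrast' in issue_desc:
--             enhanced_issue['code_fix'] = '''
-- /* CSS Fix for contrast issues */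
-- .text-element {
--     color: #212529; /* WCAG AA compliant dark gray */
--     background-color: #ffffff;
--     /* Contrast ratio: 12.63:1 - exceeds WCAG AAA */
-- }
--
-- /* For dark backgrounds */
-- .dark-bg {
--     background-color: #1a1a1a;
--     color: #f8f9fa; /* High contrast light gray */
-- }'''
--         elif 'alt text' in issue_desc:
--             enhanced_issue['code_fix'] = '''
-- <!-- HTML Fix for missing alt text -->
-- <img src="image.jpg"
--      alt="Descriptive text explaining the image content and purpose"
--      role="img"
--      aria-label="Additional context if needed">
--
-- <!-- For decorative images -->
-- <img src="decorative.jpg" alt="" role="presentation">'''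
--         elif 'focus' in issue_desc:
--             enhanced_issue['code_fix'] = '''
-- /* CSS Fix for focus indicators */
-- :focus-visible {
--     outline: 3px solid #0066cc;
--     outline-offset: 2px;
--     box-shadow: 0 0 0 3px rgba(0, 102, 204, 0.25);
-- }
--
-- /* Skip navigation focus */
-- a:focus, button:focus, input:focus, textarea:focus {
--     outline: 2px solid #0066cc;
--     outline-offset: 2px;
-- }'''
--
--         enhanced_issues.append(enhanced_issue)
--
--     return enhanced_issues
-- ===== SOURCE B (Python) =====
-- # Alternative: staged keyword passes over the whole list (reverse priority order, later pass
-- # overwrites) instead of a per-issue first-match branch chain; same return value.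
-- from typing import List, Dict
--
-- _CONTRAST_FIX = '''
-- /* CSS Fix for contrast issues */
-- .text-element {
--     color: #212529; /* WCAG AA compliant dark gray */
--     background-color: #ffffff;
--     /* Contrast ratio: 12.63:1 - exceeds WCAG AAA */
-- }
--
-- /* For dark backgrounds */
-- .dark-bg {
--     background-color: #1a1a1a;
--     color: #f8f9fa; /* High contrast light gray */
-- }'''
--
-- _ALT_TEXT_FIX = '''
-- <!-- HTML Fix for missing alt text -->
-- <img src="image.jpg"
--      alt="Descriptive text explaining the image content and purpose"
--      role="img"
--      aria-label="Additional context if needed">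
--
-- <!-- For decorative images -->
-- <img src="decorative.jpg" alt="" role="presentation">'''
--
-- _FOCUS_FIX = '''
-- /* CSS Fix for focus indicators */
-- :focus-visible {
--     outline: 3px solid #0066cc;
--     outline-offset: 2px;
--     box-shadow: 0 0 0 3px rgba(0, 102, 204, 0.25);
-- }
--
-- /* Skip navigation focus */
-- a:focus, button:focus, input:focus, textarea:focus {
--     outline: 2px solid #0066cc;
--     outline-offset: 2px;
-- }'''
--
-- # priority order: contrast, alt text, focus
-- _FIX_TABLE = [('contrast', _CONTRAST_FIX), ('alt text', _ALT_TEXT_FIX), ('focus', _FOCUS_FIX)]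
--
--
-- def enhance_issues_with_fixes(issues: List[Dict], nemotron_content: str) -> List[Dict]:
--     """Add code fixes from Nemotron to existing issues"""
--     enhanced = [issue.copy() for issue in issues]
--     # staged passes in reverse priority: a later (higher-priority) pass overwrites,
--     # so each issue ends with the fix of its first matching keyword, or no key at all
--     for keyword, fix in reversed(_FIX_TABLE):
--         for e in enhanced:
--             if keyword in e.get('description', '').lower():
--                 e['code_fix'] = fix
--     return enhanced
-- ===== Notes on version B (the rewrite author's own statement) =====
-- stated objective: alternative
-- what changed: Replaces the per-issue if/elif first-match chain with staged whole-list passes: copy all issues once, then sweep the list once per keyword in reverse priority order, overwriting code_fix on matches so the highest-priority keyword wins; no-match issues are never touched.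
import Mathlib
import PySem

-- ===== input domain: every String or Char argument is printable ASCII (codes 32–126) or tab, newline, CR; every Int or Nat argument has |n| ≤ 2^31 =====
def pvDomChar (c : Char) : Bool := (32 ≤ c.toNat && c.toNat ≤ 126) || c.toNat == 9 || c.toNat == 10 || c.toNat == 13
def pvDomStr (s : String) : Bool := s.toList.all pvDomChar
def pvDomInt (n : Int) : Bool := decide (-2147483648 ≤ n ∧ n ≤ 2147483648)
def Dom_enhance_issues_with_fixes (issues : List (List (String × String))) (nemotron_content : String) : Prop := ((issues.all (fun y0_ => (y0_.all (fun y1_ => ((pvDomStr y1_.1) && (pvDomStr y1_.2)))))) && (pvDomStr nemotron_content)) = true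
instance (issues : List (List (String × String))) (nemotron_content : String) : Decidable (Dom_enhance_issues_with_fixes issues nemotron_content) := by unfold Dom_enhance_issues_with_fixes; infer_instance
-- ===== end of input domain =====

set_option maxHeartbeats 4000000


-- B replaces A's per-issue if/elif chain by staged whole-list passes, one per keyword in reverse
-- priority order with overwrite (alternative structure, same cost); return value only.

-- shared string constants (the literal fix snippets of the Python source)
def pvContrastFix : String := "\n/* CSS Fix for contrast issues */\n.text-element {\n    color: #212529; /* WCAG AA compliant dark gray */\n    background-color: #ffffff;\n    /* Contrast ratio: 12.63:1 - exceeds WCAG AAA */\n}\n\n/* For dark backgrounds */\n.dark-bg {\n    background-color: #1a1a1a;\n    color: #f8f9fa; /* High contrast light gray */\n}"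
def pvAltTextFix : String := "\n<!-- HTML Fix for missing alt text -->\n<img src=\"image.jpg\" \n     alt=\"Descriptive text explaining the image content and purpose\"\n     role=\"img\"\n     aria-label=\"Additional context if needed\">\n\n<!-- For decorative images -->\n<img src=\"decorative.jpg\" alt=\"\" role=\"presentation\">"
def pvFocusFix : String := "\n/* CSS Fix for focus indicators */\n:focus-visible {\n    outline: 3px solid #0066cc;\n    outline-offset: 2px;\n    box-shadow: 0 0 0 3px rgba(0, 102, 204, 0.25);\n}\n\n/* Skip navigation focus */\na:focus, button:focus, input:focus, textarea:focus {\n    outline: 2px solid #0066cc;\n    outline-offset: 2px;\n}"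

-- ===== PORT A =====
-- literal transliteration of A: accumulator loop, copy, if/elif chain assigning code_fix
def enhance_issues_with_fixes (issues : List (List (String × String))) (nemotron_content : String) : List (List (String × String)) :=
  issues.foldl (fun enhanced_issues issue =>
    let d := PySem.Dict.ofList issue
    let enhanced_issue := d
    let issue_desc := PySem.Str.lower (PySem.Dict.getD d "description" "")
    let enhanced_issue :=
      if PySem.Str.isIn "contrast" issue_desc then enhanced_issue.insert "code_fix" pvContrastFix
      else if PySem.Str.isIn "alt text" issue_desc then enhanced_issue.insert "code_fix" pvAltTextFix
      else if PySem.Str.isIn "focus" issue_desc then enhanced_issue.insert "code_fix" pvFocusFix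
      else enhanced_issue
    enhanced_issues ++ [enhanced_issue.items]) []

-- ===== PORT B =====
-- B-side helper: the priority table (contrast, alt text, focus)
def pvFixTable : List (String × String) := [("contrast", pvContrastFix), ("alt text", pvAltTextFix), ("focus", pvFocusFix)]

-- staged passes: copy everything, then one overwrite sweep per keyword in reverse priority order
def enhance_issues_with_fixes_alt (issues : List (List (String × String))) (nemotron_content : String) : List (List (String × String)) :=
  let enhanced := issues.map PySem.Dict.ofList
  let enhanced := pvFixTable.reverse.foldl
    (fun acc kv => acc.map (fun e =>
      if PySem.Str.isIn kv.1 (PySem.Str.lower (PySem.Dict.getD e "description" "")) then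
        e.insert "code_fix" kv.2
      else e)) enhanced
  enhanced.map PySem.Dict.items

-- ===== PRECONDITION & SPEC =====
def Spec_enhance_issues_with_fixes (issues : List (List (String × String))) (nemotron_content : String) (out : List (List (String × String))) : Prop := out = enhance_issues_with_fixes_alt issues nemotron_content
instance (issues : List (List (String × String))) (nemotron_content : String) (out : List (List (String × String))) : Decidable (Spec_enhance_issues_with_fixes issues nemotron_content out) := by unfold Spec_enhance_issues_with_fixes; infer_instance

-- ===== CLAIM =====
def Claim_equal_enhance_issues_with_fixes : Prop := ∀ (issues : List (List (String × String))) (nemotron_content : String), Dom_enhance_issues_with_fixes issues nemotron_content → Spec_enhance_issues_with_fixes issues nemotron_content (enhance_issues_with_fixes issues nemotron_content)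

-- ===== LEMMAS AND PROOFS =====

-- inserting "code_fix" does not change the "description" lookup
theorem pv_desc_insert (d : PySem.Dict String String) (v : String) :
    (d.insert "code_fix" v).getD "description" "" = d.getD "description" "" :=
  PySem.Dict.getD_insert_of_ne d v "" (by decide)

-- overwriting the same key twice keeps only the last value
theorem pv_insert_insert (d : PySem.Dict String String) (k v1 v2 : String) :
    (d.insert k v1).insert k v2 = d.insert k v2 := by
  apply PySem.Dict.ext
  by_cases h : d.contains k = true
  · rw [PySem.Dict.items_insert_of_contains _ v2 (PySem.Dict.contains_insert_self d k v1),
        PySem.Dict.items_insert_of_contains _ _ h,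
        PySem.Dict.items_insert_of_contains _ _ h, List.map_map]
    refine List.map_congr_left (fun p _ => ?_)
    by_cases hp : p.1 = k <;> simp [hp]
  · have h' : d.contains k = false := by simpa using h
    rw [PySem.Dict.items_insert_of_contains _ v2 (PySem.Dict.contains_insert_self d k v1),
        PySem.Dict.items_insert_of_not_contains _ _ h',
        PySem.Dict.items_insert_of_not_contains _ _ h', List.map_append]
    have hmem : ∀ p ∈ d.items, (p.1 == k) = false := by
      intro p hp
      by_contra hb
      have : k ∈ d.keys := by
        have : p.1 = k := by simpa using hb
        exact this ▸ PySem.Dict.mem_keys_of_mem_items d hp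
      rw [PySem.Dict.contains_eq_decide_mem_keys] at h'
      simp [this] at h'
    congr 1
    · conv_rhs => rw [← List.map_id d.items]
      exact List.map_congr_left (fun p hp => by simp [hmem p hp])
    · simp

-- per-issue: the three reverse-order overwrite passes compute A's if/elif chain
theorem pv_one_eq (d : PySem.Dict String String) :
    (fun e => if PySem.Str.isIn "contrast" (PySem.Str.lower (e.getD "description" "")) = true then
        e.insert "code_fix" pvContrastFix else e)
    ((fun e => if PySem.Str.isIn "alt text" (PySem.Str.lower (e.getD "description" "")) = true then
        e.insert "code_fix" pvAltTextFix else e)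
     ((fun e => if PySem.Str.isIn "focus" (PySem.Str.lower (e.getD "description" "")) = true then
        e.insert "code_fix" pvFocusFix else e) d)) =
    (if PySem.Str.isIn "contrast" (PySem.Str.lower (d.getD "description" "")) = true then
       d.insert "code_fix" pvContrastFix
     else if PySem.Str.isIn "alt text" (PySem.Str.lower (d.getD "description" "")) = true then
       d.insert "code_fix" pvAltTextFix
     else if PySem.Str.isIn "focus" (PySem.Str.lower (d.getD "description" "")) = true then
       d.insert "code_fix" pvFocusFix
     else d) := by
  by_cases hf : PySem.Str.isIn "focus" (PySem.Str.lower (d.getD "description" "")) = true <;>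
    by_cases ha : PySem.Str.isIn "alt text" (PySem.Str.lower (d.getD "description" "")) = true <;>
      by_cases hc : PySem.Str.isIn "contrast" (PySem.Str.lower (d.getD "description" "")) = true <;>
        simp_all [pv_desc_insert, pv_insert_insert]

-- the per-issue goal of the main proof, in its composed form
theorem pv_main (issue : List (String × String)) :
    (if PySem.Str.isIn "contrast" (PySem.Str.lower ((PySem.Dict.ofList issue).getD "description" "")) = true then
        (PySem.Dict.ofList issue).insert "code_fix" pvContrastFix
      else
        if PySem.Str.isIn "alt text" (PySem.Str.lower ((PySem.Dict.ofList issue).getD "description" "")) = true then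
          (PySem.Dict.ofList issue).insert "code_fix" pvAltTextFix
        else
          if PySem.Str.isIn "focus" (PySem.Str.lower ((PySem.Dict.ofList issue).getD "description" "")) = true then
            (PySem.Dict.ofList issue).insert "code_fix" pvFocusFix
          else PySem.Dict.ofList issue).items =
    (PySem.Dict.items ∘
        (fun e =>
            if PySem.Str.isIn "contrast" (PySem.Str.lower (e.getD "description" "")) = true then
              e.insert "code_fix" pvContrastFix
            else e) ∘
          (fun e =>
              if PySem.Str.isIn "alt text" (PySem.Str.lower (e.getD "description" "")) = true then
                e.insert "code_fix" pvAltTextFix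
              else e) ∘
            (fun e =>
                if PySem.Str.isIn "focus" (PySem.Str.lower (e.getD "description" "")) = true then
                  e.insert "code_fix" pvFocusFix
                else e) ∘
              PySem.Dict.ofList)
      issue := by
  rw [Function.comp_apply, Function.comp_apply, Function.comp_apply, Function.comp_apply]
  exact (congrArg PySem.Dict.items (pv_one_eq (PySem.Dict.ofList issue))).symm

-- ===== VERDICT =====
theorem enhance_issues_with_fixes_spec : Claim_equal_enhance_issues_with_fixes := by
  intro issues nemotron_content _
  unfold Spec_enhance_issues_with_fixes enhance_issues_with_fixes enhance_issues_with_fixes_alt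
  rw [PySem.List.foldl_append_singleton_eq_map]
  simp only [pvFixTable, List.reverse_cons, List.reverse_nil, List.nil_append,
    List.cons_append, List.foldl_cons, List.foldl_nil, List.map_map]
  exact List.map_congr_left (fun issue _ => pv_main issue)
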